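-- pv_equiv track=rewrite | github.com/shoyip/ScrapePinterest | plot_wordmaps_with_bertopic.py | build_counters
-- ===== SOURCE A (Python) =====
-- from collections import Counter
--
-- def build_counters(rows):
--     land = Counter()
--     char = Counter()
--     for label, words in rows:
--         if label in ("landscape_strong", "landscape_mixed"):
--             land.update(words)
--         if label == "character_focused":
--             char.update(words)
--     return land, char
-- ===== SOURCE B (Python) =====
-- from collections import Counter
--
-- _LAND = ("landscape_strong", "landscape_mixed")
--
-- def build_counters(rows):
--     rows = list(rows)
--     if not rows:
--         return Counter(), Counter()
--     if len(rows) == 1: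
--         label, words = rows[0]
--         land = Counter(words) if label in _LAND else Counter()
--         char = Counter(words) if label == "character_focused" else Counter()
--         return land, char
--     mid = len(rows) // 2
--     land1, char1 = build_counters(rows[:mid])
--     land2, char2 = build_counters(rows[mid:])
--     land1.update(land2)
--     char1.update(char2)
--     return land1, char1
-- ===== Notes on version B (the rewrite author's own statement) =====
-- stated objective: alternative
-- what changed: Replaces the single linear loop with interleaved .update calls by a divide-and-conquer recursion: split rows in half, recursively build the two counters for each half, and merge them with order-preserving Counter addition.
import Mathlib
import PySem

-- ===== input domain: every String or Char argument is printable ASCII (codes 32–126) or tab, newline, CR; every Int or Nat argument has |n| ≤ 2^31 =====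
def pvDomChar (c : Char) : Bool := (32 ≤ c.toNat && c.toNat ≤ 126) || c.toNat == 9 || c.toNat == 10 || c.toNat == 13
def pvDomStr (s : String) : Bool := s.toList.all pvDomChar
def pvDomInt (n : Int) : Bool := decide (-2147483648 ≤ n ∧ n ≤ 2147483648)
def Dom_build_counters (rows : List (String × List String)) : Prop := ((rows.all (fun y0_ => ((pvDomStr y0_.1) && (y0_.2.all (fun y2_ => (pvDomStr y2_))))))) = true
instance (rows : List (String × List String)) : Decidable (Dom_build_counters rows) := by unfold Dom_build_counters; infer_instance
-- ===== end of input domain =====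

-- B replaces A's single linear loop with interleaved .update calls by a divide-and-conquer
-- recursion (split rows in half, recurse, merge counters order-preservingly); alternative, same cost.

-- ===== PORT A =====
-- Counter.update(words): d[w] = d.get(w, 0) + 1 for each w
def pvCntUpdate (d : PySem.Dict String Int) (ws : List String) : PySem.Dict String Int :=
  ws.foldl (fun d w => d.modify w 0 (· + 1)) d

-- one loop iteration of A: the two independent ifs, in order
def pvStep (st : PySem.Dict String Int × PySem.Dict String Int) (r : String × List String) :
    PySem.Dict String Int × PySem.Dict String Int :=
  let st1 := if r.1 == "landscape_strong" || r.1 == "landscape_mixed" then (pvCntUpdate st.1 r.2, st.2) else st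
  if r.1 == "character_focused" then (st1.1, pvCntUpdate st1.2 r.2) else st1

def build_counters (rows : List (String × List String)) : (List (String × Int)) × (List (String × Int)) :=
  let st := rows.foldl pvStep (PySem.Dict.empty, PySem.Dict.empty)
  (st.1.items, st.2.items)

-- ===== PORT B =====
-- c1.update(c2) for Counters: for (k, v) in c2.items(): c1[k] = c1.get(k, 0) + v
def pvMergeCnt (d1 d2 : PySem.Dict String Int) : PySem.Dict String Int :=
  d2.items.foldl (fun d p => d.modify p.1 0 (· + p.2)) d1

-- B's recursion (Counters as Dicts; the entry point returns their items per the type convention).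
-- rows[:mid] / rows[mid:] with 0 ≤ mid ≤ len(rows) are exactly List.take mid / List.drop mid.
def pvBC : List (String × List String) → PySem.Dict String Int × PySem.Dict String Int
  | [] => (PySem.Dict.empty, PySem.Dict.empty)
  | [(label, words)] =>
      ((if label == "landscape_strong" || label == "landscape_mixed" then PySem.Dict.counter words else PySem.Dict.empty),
       (if label == "character_focused" then PySem.Dict.counter words else PySem.Dict.empty))
  | r1 :: r2 :: rest =>
      let mid := (r1 :: r2 :: rest).length / 2
      let lc1 := pvBC ((r1 :: r2 :: rest).take mid)
      let lc2 := pvBC ((r1 :: r2 :: rest).drop mid)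
      (pvMergeCnt lc1.1 lc2.1, pvMergeCnt lc1.2 lc2.2)
termination_by rows => rows.length
decreasing_by
  · simp [List.length_take]; omega
  · simp [List.length_drop]; omega

def build_counters_alt (rows : List (String × List String)) : (List (String × Int)) × (List (String × Int)) :=
  let lc := pvBC rows
  (lc.1.items, lc.2.items)

-- ===== PRECONDITION & SPEC =====
def Spec_build_counters (rows : List (String × List String)) (out : (List (String × Int)) × (List (String × Int))) : Prop := out = build_counters_alt rows
instance (rows : List (String × List String)) (out : (List (String × Int)) × (List (String × Int))) : Decidable (Spec_build_counters rows out) := by unfold Spec_build_counters; infer_instance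

-- ===== CLAIM (what is proved, stated in full; the proofs are below) =====
def Claim_equal_build_counters : Prop := ∀ (rows : List (String × List String)), Dom_build_counters rows → Spec_build_counters rows (build_counters rows)

-- ===== LEMMAS AND PROOFS =====

-- the word streams the two counters count
def pvLw (rows : List (String × List String)) : List String :=
  (rows.filter (fun r => r.1 == "landscape_strong" || r.1 == "landscape_mixed")).flatMap Prod.snd
def pvCw (rows : List (String × List String)) : List String :=
  (rows.filter (fun r => r.1 == "character_focused")).flatMap Prod.snd

theorem pvCntUpdate_append (d : PySem.Dict String Int) (xs ys : List String) :
    pvCntUpdate d (xs ++ ys) = pvCntUpdate (pvCntUpdate d xs) ys := by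
  simp [pvCntUpdate, List.foldl_append]

theorem build_counters_fold (rows : List (String × List String)) :
    ∀ (l c : PySem.Dict String Int),
    rows.foldl pvStep (l, c) = (pvCntUpdate l (pvLw rows), pvCntUpdate c (pvCw rows)) := by
  induction rows with
  | nil => intro l c; simp [pvLw, pvCw, pvCntUpdate]
  | cons r rest ih =>
    intro l c
    obtain ⟨lab, ws⟩ := r
    rw [List.foldl_cons, ih]
    by_cases hl : (lab == "landscape_strong" || lab == "landscape_mixed") = true
    · have hc : (lab == "character_focused") = false := by
        rcases Bool.or_eq_true_iff.mp hl with h | h <;> simp_all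
      simp [pvStep, pvLw, pvCw, hl, hc, pvCntUpdate_append]
    · by_cases hc : (lab == "character_focused") = true
      · simp [pvStep, pvLw, pvCw, hl, hc, pvCntUpdate_append]
      · simp [pvStep, pvLw, pvCw, hl, hc]

theorem pvCntUpdate_empty (xs : List String) :
    pvCntUpdate PySem.Dict.empty xs = PySem.Dict.counter xs := rfl

-- value of the merge fold at any key
theorem pv_getD_mergefold (l : List (String × Int)) (d : PySem.Dict String Int) (k : String) :
    (l.foldl (fun d p => d.modify p.1 0 (· + p.2)) d).getD k 0
      = d.getD k 0 + ((l.filter (fun p => p.1 == k)).map Prod.snd).sum := by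
  induction l generalizing d with
  | nil => simp
  | cons p t ih =>
    rw [List.foldl_cons, ih]
    by_cases h : p.1 = k
    · simp [h]
      ring
    · have h' : (p.1 == k) = false := by simpa using h
      have h'' : ¬ k = p.1 := fun e => h e.symm
      simp [PySem.Dict.getD_modify, h'', h']

-- sum of the values of a key-filtered nodup item list
theorem pv_sum_filter (L : List String) (hnd : L.Nodup) (k : String) (f : String → Int) :
    (((L.map (fun x => (x, f x))).filter (fun p => p.1 == k)).map Prod.snd).sum
      = if k ∈ L then f k else 0 := by
  induction L with
  | nil => simp
  | cons x t ih =>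
    rcases List.nodup_cons.mp hnd with ⟨hx, ht⟩
    by_cases h : x = k
    · subst h
      simp [ih ht, hx]
    · have h' : (x == k) = false := by simpa using h
      have h'' : ¬ k = x := fun e => h e.symm
      simp [h', h'', ih ht]

theorem pvMergeCnt_counter (xs ys : List String) :
    pvMergeCnt (PySem.Dict.counter xs) (PySem.Dict.counter ys) = PySem.Dict.counter (xs ++ ys) := by
  apply PySem.Dict.ext
  have hnd : (pvMergeCnt (PySem.Dict.counter xs) (PySem.Dict.counter ys)).keys.Nodup := by
    exact PySem.Dict.nodup_keys_foldl_modify_key _ Prod.fst _ _ _ (PySem.Dict.nodup_keys_counter _)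
  have hkeys : (pvMergeCnt (PySem.Dict.counter xs) (PySem.Dict.counter ys)).keys
      = (PySem.Dict.counter (xs ++ ys)).keys := by
    have h1 : (pvMergeCnt (PySem.Dict.counter xs) (PySem.Dict.counter ys)).keys
        = PySem.Set.update (PySem.Dict.counter xs).keys ((PySem.Dict.counter ys).items.map Prod.fst) := by
      exact PySem.Dict.keys_foldl_modify_key _ Prod.fst _ _ _
    have h2 : (PySem.Dict.counter ys).items.map Prod.fst = (PySem.Dict.counter (ys : List String)).keys := rfl
    rw [h1, h2, PySem.Dict.keys_counter, PySem.Dict.keys_counter, PySem.Dict.keys_counter,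
        PySem.Set.ofList_append]
    rw [PySem.Set.update_eq_append_filter, PySem.Set.update_eq_append_filter, PySem.Set.ofList_ofList]
  have hval : ∀ k, (pvMergeCnt (PySem.Dict.counter xs) (PySem.Dict.counter ys)).getD k 0
      = ((xs ++ ys).count k : Int) := by
    intro k
    rw [pvMergeCnt.eq_def, pv_getD_mergefold, PySem.Dict.getD_counter, PySem.Dict.items_counter,
        pv_sum_filter (PySem.Set.ofList ys) (PySem.Set.nodup_ofList ys) k (fun x => ((ys.count x : Nat) : Int))]
    by_cases hk : k ∈ ys
    · have : k ∈ PySem.Set.ofList ys := (PySem.Set.mem_ofList ys k).mpr hk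
      simp [this, List.count_append]
    · have : k ∉ PySem.Set.ofList ys := fun h => hk ((PySem.Set.mem_ofList ys k).mp h)
      have hc : ys.count k = 0 := List.count_eq_zero_of_not_mem hk
      simp [this, List.count_append, hc]
  rw [PySem.Dict.items_eq_map_keys _ hnd 0,
      PySem.Dict.items_eq_map_keys (PySem.Dict.counter (xs ++ ys)) (PySem.Dict.nodup_keys_counter _) 0,
      hkeys]
  exact List.map_congr_left (fun k _ => by rw [hval k, PySem.Dict.getD_counter])

theorem pv_words_split (rows : List (String × List String)) (n : Nat) :
    pvLw (rows.take n) ++ pvLw (rows.drop n) = pvLw rows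
      ∧ pvCw (rows.take n) ++ pvCw (rows.drop n) = pvCw rows := by
  constructor <;>
    simp [pvLw, pvCw, ← List.flatMap_append, ← List.filter_append, List.take_append_drop]

theorem pvBC_eq (rows : List (String × List String)) :
    pvBC rows = (PySem.Dict.counter (pvLw rows), PySem.Dict.counter (pvCw rows)) := by
  match rows with
  | [] => rw [pvBC]; rfl
  | [(label, words)] =>
    rw [pvBC]
    by_cases hl : (label == "landscape_strong" || label == "landscape_mixed") = true
    · have hc : (label == "character_focused") = false := by
        rcases Bool.or_eq_true_iff.mp hl with h | h <;> simp_all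
      simp [pvLw, pvCw, hl, hc, PySem.Dict.counter]
    · by_cases hc : (label == "character_focused") = true
      · simp [pvLw, pvCw, hl, hc, PySem.Dict.counter]
      · simp [pvLw, pvCw, hl, hc, PySem.Dict.counter]
  | r1 :: r2 :: rest =>
    have h1 := pvBC_eq ((r1 :: r2 :: rest).take ((r1 :: r2 :: rest).length / 2))
    have h2 := pvBC_eq ((r1 :: r2 :: rest).drop ((r1 :: r2 :: rest).length / 2))
    obtain ⟨hw1, hw2⟩ := pv_words_split (r1 :: r2 :: rest) ((r1 :: r2 :: rest).length / 2)
    rw [pvBC, h1, h2]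
    simp only []
    rw [pvMergeCnt_counter, pvMergeCnt_counter, hw1, hw2]
termination_by rows.length
decreasing_by
  · simp [List.length_take]; omega
  · simp [List.length_drop]; omega

-- ===== VERDICT (by name: the statement is the Claim_ definition above) =====
theorem build_counters_spec : Claim_equal_build_counters := by
  intro rows _
  unfold Spec_build_counters build_counters build_counters_alt
  rw [build_counters_fold rows PySem.Dict.empty PySem.Dict.empty, pvBC_eq,
      pvCntUpdate_empty, pvCntUpdate_empty]
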